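-- pv_equiv track=rewrite | github.com/owenyi/JDBC | 00_algorithm/Stage1/10_LinkedList&Tree/problem3.py | heap_max
-- ===== SOURCE A (Python) =====
-- def heap_max(q):
--     i = 1
--     n = len(q) + 1
--     while True:
--         if i * 2 >= n: break
--         i *= 2
--         if i + 1 < n and q[i - 1] < q[(i - 1) + 1]: i += 1
--     return i - 1
-- ===== SOURCE B (Python) =====
-- def heap_max(q):
--     n = len(q)
--
--     def descend(i):
--         left = 2 * i + 1
--         if left >= n:
--             return i
--         right = left + 1
--         if right < n and q[left] < q[right]:
--             return descend(right)
--         return descend(left)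
--
--     return descend(0)
-- ===== Notes on version B (the rewrite author's own statement) =====
-- stated objective: simpler
-- what changed: Replaced the 1-based while-loop with sentinel length n=len(q)+1 by a direct recursive descent over the heap as a 0-based binary tree (descend(i) follows the strictly larger child to a leaf).
import Mathlib
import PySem

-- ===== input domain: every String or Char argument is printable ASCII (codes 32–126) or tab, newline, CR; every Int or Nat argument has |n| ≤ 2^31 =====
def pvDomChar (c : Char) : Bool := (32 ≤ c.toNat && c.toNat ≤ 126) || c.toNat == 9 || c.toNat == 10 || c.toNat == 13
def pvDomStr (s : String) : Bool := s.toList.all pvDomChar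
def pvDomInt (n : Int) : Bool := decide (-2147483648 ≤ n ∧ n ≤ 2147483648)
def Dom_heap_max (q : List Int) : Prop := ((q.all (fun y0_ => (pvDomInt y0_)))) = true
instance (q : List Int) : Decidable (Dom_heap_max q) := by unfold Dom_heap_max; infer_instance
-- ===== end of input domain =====

-- B replaces A's 1-based while-loop (sentinel n = len(q)+1) with a 0-based recursive descent over the heap tree; same cost, simpler decomposition.


-- ===== PORT A =====
-- Transliteration of A's while-loop: state i (1-based), n = len(q)+1; fuel n is ample
-- (i at least doubles each pass). List indices are always in range, so getD 0 is exact.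
def heapA_go (q : List Int) (n : Nat) : Nat → Nat → Nat
  | 0, i => i
  | fuel + 1, i =>
      if i * 2 ≥ n then i
      else
        let i2 := i * 2
        let i3 := if i2 + 1 < n ∧ q.getD (i2 - 1) 0 < q.getD ((i2 - 1) + 1) 0 then i2 + 1 else i2
        heapA_go q n fuel i3

def heap_max (q : List Int) : Int :=
  ((heapA_go q (q.length + 1) (q.length + 1) 1 : Nat) : Int) - 1

-- ===== PORT B =====
-- Transliteration of B: recursive descent over the 0-based binary tree.
def heapB_descend (q : List Int) (i : Nat) : Nat :=
  if h : 2 * i + 1 ≥ q.length then i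
  else
    if 2 * i + 2 < q.length ∧ q.getD (2 * i + 1) 0 < q.getD (2 * i + 2) 0 then
      heapB_descend q (2 * i + 2)
    else
      heapB_descend q (2 * i + 1)
termination_by q.length - i
decreasing_by all_goals omega

def heap_max_alt (q : List Int) : Int :=
  ((heapB_descend q 0 : Nat) : Int)

-- ===== PRECONDITION & SPEC =====
def Spec_heap_max (q : List Int) (out : Int) : Prop := out = heap_max_alt q
instance (q : List Int) (out : Int) : Decidable (Spec_heap_max q out) := by unfold Spec_heap_max; infer_instance

-- ===== CLAIM (what is proved, stated in full; the proofs are below) =====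
def Claim_equal_heap_max : Prop := ∀ (q : List Int), Dom_heap_max q → Spec_heap_max q (heap_max q)

-- ===== LEMMAS AND PROOFS =====
theorem heapA_go_eq_descend (q : List Int) :
    ∀ (fuel i : Nat), 1 ≤ i → q.length + 1 ≤ fuel + i →
      heapA_go q (q.length + 1) fuel i = heapB_descend q (i - 1) + 1 := by
  intro fuel
  induction fuel with
  | zero =>
      intro i h1 hf
      rw [heapA_go, heapB_descend]
      simp only [dif_pos (by omega : 2 * (i - 1) + 1 ≥ q.length)]
      omega
  | succ fuel ih =>
      intro i h1 hf
      rw [heapA_go]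
      by_cases hbr : i * 2 ≥ q.length + 1
      · rw [if_pos hbr, heapB_descend]
        simp only [dif_pos (by omega : 2 * (i - 1) + 1 ≥ q.length)]
        omega
      · rw [if_neg hbr]
        simp only []
        rw [heapB_descend]
        have hlt : ¬ (2 * (i - 1) + 1 ≥ q.length) := by omega
        simp only [dif_neg hlt]
        have hidx : 2 * (i - 1) + 1 = i * 2 - 1 := by omega
        have hidx2 : 2 * (i - 1) + 2 = (i * 2 - 1) + 1 := by omega
        by_cases hc : i * 2 + 1 < q.length + 1 ∧ q.getD (i * 2 - 1) 0 < q.getD ((i * 2 - 1) + 1) 0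
        · rw [if_pos hc, if_pos (by rw [hidx, hidx2]; exact ⟨by omega, hc.2⟩)]
          have := ih (i * 2 + 1) (by omega) (by omega)
          rw [this]
          congr 2
          omega
        · rw [if_neg hc, if_neg (by rw [hidx, hidx2]; intro hcontra; exact hc ⟨by omega, hcontra.2⟩)]
          have := ih (i * 2) (by omega) (by omega)
          rw [this]
          congr 2
          omega

-- ===== VERDICT (by name: the statement is the Claim_ definition above) =====
theorem heap_max_spec : Claim_equal_heap_max := by
  intro q _
  unfold Spec_heap_max heap_max heap_max_alt
  rw [heapA_go_eq_descend q (q.length + 1) 1 (by omega) (by omega)]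
  push_cast
  ring
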